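-- pv_equiv track=rewrite | github.com/rex223/Bondhu_Prototype | bondhu-ai/chat/conversation_gist.py | _extract_last_question
-- ===== SOURCE A (Python) =====
-- from typing import List, Optional
--
-- QUESTION_WORDS = ["who", "what", "when", "where", "why", "how", "did", "do", "does", "can", "could", "would"]
--
-- def _extract_last_question(messages: List[str]) -> Optional[str]:
--     for msg in reversed(messages):
--         text = msg.strip()
--         if not text:
--             continue
--         if "?" in text or any(text.lower().startswith(word + " ") for word in QUESTION_WORDS):
--             return text
--     return None
-- ===== SOURCE B (Python) =====
-- from typing import List, Optional
--
-- QUESTION_WORDS = ["who", "what", "when", "where", "why", "how", "did", "do", "does", "can", "could", "would"]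
--
-- def _looks_like_question(text: str) -> bool:
--     if "?" in text:
--         return True
--     head, sep, _tail = text.lower().partition(" ")
--     return bool(sep) and head in QUESTION_WORDS
--
-- def _extract_last_question(messages: List[str]) -> Optional[str]:
--     candidates = [t for t in (m.strip() for m in messages) if t and _looks_like_question(t)]
--     return candidates[-1] if candidates else None
-- ===== Notes on version B (the rewrite author's own statement) =====
-- stated objective: alternative
-- what changed: B does two staged passes - build the list of stripped question-looking messages with a comprehension, then take its last element - and tests 'question word' by partitioning the lowered text at the first space and checking the head by membership, instead of A's reversed loop with early return and per-word startswith probes.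
import Mathlib
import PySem

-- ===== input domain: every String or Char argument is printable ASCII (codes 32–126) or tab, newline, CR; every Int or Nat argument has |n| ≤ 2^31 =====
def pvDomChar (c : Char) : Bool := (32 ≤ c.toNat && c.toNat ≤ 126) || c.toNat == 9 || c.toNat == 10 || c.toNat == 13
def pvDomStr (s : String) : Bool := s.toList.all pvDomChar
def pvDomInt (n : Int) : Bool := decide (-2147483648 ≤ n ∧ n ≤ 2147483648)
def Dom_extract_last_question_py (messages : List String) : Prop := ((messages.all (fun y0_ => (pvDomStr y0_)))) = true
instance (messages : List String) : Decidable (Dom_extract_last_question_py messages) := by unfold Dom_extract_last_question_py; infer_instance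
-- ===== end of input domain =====

-- B builds the list of all stripped question-looking messages and returns its last
-- element, testing question words by first-space partition + membership, instead of
-- A's reversed loop with early return and per-word startswith (objective: alternative).

-- ===== PORT A =====
def pyQuestionWords : List String :=
  ["who", "what", "when", "where", "why", "how", "did", "do", "does", "can", "could", "would"]

-- 'for msg in reversed(messages): …' with early return, as structural recursion on the reversed list
def pyGoA : List String → Option String
  | [] => none
  | msg :: rest =>
    let text := PySem.Str.strip msg
    if text = "" then pyGoA rest
    else if PySem.Str.isIn "?" text
         || pyQuestionWords.any (fun word =>
              PySem.Chars.startswith (PySem.Chars.lower text.toList) (word.toList ++ [' '])) then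
      some text
    else pyGoA rest

def extract_last_question_py (messages : List String) : Option String :=
  pyGoA messages.reverse

-- ===== PORT B =====
def altQuestionWords : List (List Char) :=
  [['w','h','o'], ['w','h','a','t'], ['w','h','e','n'], ['w','h','e','r','e'],
   ['w','h','y'], ['h','o','w'], ['d','i','d'], ['d','o'], ['d','o','e','s'],
   ['c','a','n'], ['c','o','u','l','d'], ['w','o','u','l','d']]

-- text.lower().partition(" ") ported by hand (exact for the one-char separator):
-- head = chars before the first space, sep nonempty iff a space occurs
def altLooksLikeQuestion (text : String) : Bool :=
  if PySem.Str.isIn "?" text then true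
  else
    let lowered := PySem.Chars.lower text.toList
    lowered.any (· == ' ') && altQuestionWords.contains (lowered.takeWhile (· != ' '))

def extract_last_question_py_alt (messages : List String) : Option String :=
  ((messages.map PySem.Str.strip).filter
    (fun t => !(t == "") && altLooksLikeQuestion t)).getLast?

-- ===== PRECONDITION & SPEC =====
def Spec_extract_last_question_py (messages : List String) (out : Option String) : Prop := out = extract_last_question_py_alt messages
instance (messages : List String) (out : Option String) : Decidable (Spec_extract_last_question_py messages out) := by unfold Spec_extract_last_question_py; infer_instance

-- ===== CLAIM (what is proved, stated in full; the proofs are below) =====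
def Claim_equal_extract_last_question_py : Prop := ∀ (messages : List String), Dom_extract_last_question_py messages → Spec_extract_last_question_py messages (extract_last_question_py messages)

-- ===== LEMMAS AND PROOFS =====

-- startswith a space-free word followed by a space ⟺ the first-space head equals the word
theorem prefix_word_space (cs w : List Char) (hw : ' ' ∉ w) :
    (w ++ [' '] <+: cs) ↔ (cs.takeWhile (· != ' ') = w ∧ ' ' ∈ cs) := by
  induction w generalizing cs with
  | nil =>
    cases cs with
    | nil => simp
    | cons c t =>
      by_cases hc : c = ' '
      · subst hc; simp [List.cons_prefix_cons]
      · simp [List.cons_prefix_cons, hc, Ne.symm hc]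
  | cons a w ih =>
    cases cs with
    | nil => simp
    | cons c t =>
      have ha : a ≠ ' ' := fun h => hw (h ▸ List.mem_cons_self)
      have hw' : ' ' ∉ w := fun h => hw (List.mem_cons_of_mem _ h)
      by_cases hc : c = a
      · subst hc
        simp [List.cons_prefix_cons, ha, ih t hw', Ne.symm ha]
      · by_cases hsp : c = ' '
        · subst hsp
          simp [List.cons_prefix_cons, Ne.symm hc]
        · simp [List.cons_prefix_cons, hsp, hc, Ne.symm hc]

-- A's per-word startswith disjunction = B's space test + head membership
theorem anyWords_eq (ws : List (List Char)) (hw : ∀ w ∈ ws, ' ' ∉ w) (cs : List Char) :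
    ws.any (fun w => PySem.Chars.startswith cs (w ++ [' ']))
      = (cs.any (· == ' ') && ws.contains (cs.takeWhile (· != ' '))) := by
  rw [Bool.eq_iff_iff]
  simp only [List.any_eq_true, PySem.Chars.startswith_iff, Bool.and_eq_true,
    List.contains_iff_mem, beq_iff_eq]
  constructor
  · rintro ⟨w, hmem, hpre⟩
    obtain ⟨hhead, hsp⟩ := (prefix_word_space cs w (hw w hmem)).1 hpre
    exact ⟨⟨' ', hsp, rfl⟩, hhead ▸ hmem⟩
  · rintro ⟨⟨c, hc, hceq⟩, hmem⟩
    have hsp : ' ' ∈ cs := hceq ▸ hc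
    exact ⟨_, hmem, (prefix_word_space cs _ (hw _ hmem)).2 ⟨rfl, hsp⟩⟩

theorem altWords_eq : altQuestionWords = pyQuestionWords.map String.toList := by decide

-- A's branch condition equals B's helper
theorem cond_eq (t : String) :
    (PySem.Str.isIn "?" t
      || pyQuestionWords.any (fun word =>
           PySem.Chars.startswith (PySem.Chars.lower t.toList) (word.toList ++ [' '])))
      = altLooksLikeQuestion t := by
  unfold altLooksLikeQuestion
  by_cases h : PySem.Str.isIn "?" t = true
  · rw [if_pos h, h, Bool.true_or]
  · rw [if_neg h]
    rw [Bool.not_eq_true] at h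
    rw [h, Bool.false_or]
    have := anyWords_eq (pyQuestionWords.map String.toList) (by decide)
      (PySem.Chars.lower t.toList)
    rw [List.any_map] at this
    rw [altWords_eq]
    exact this

-- A's reversed early-return scan = head of the filtered stripped list
theorem goA_eq_head (l : List String) :
    pyGoA l = ((l.map PySem.Str.strip).filter
      (fun t => !(t == "") && altLooksLikeQuestion t)).head? := by
  induction l with
  | nil => simp [pyGoA]
  | cons m rest ih =>
    rw [List.map_cons, List.filter_cons]
    simp only [pyGoA, cond_eq]
    by_cases he : PySem.Str.strip m = ""
    · simp [he, ih]
    · by_cases hq : altLooksLikeQuestion (PySem.Str.strip m) = true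
      · simp [he, hq]
      · simp [he, hq, ih]

-- ===== VERDICT (by name: the statement is the Claim_ definition above) =====
theorem extract_last_question_py_spec : Claim_equal_extract_last_question_py := by
  intro messages _
  unfold Spec_extract_last_question_py extract_last_question_py extract_last_question_py_alt
  rw [goA_eq_head, List.map_reverse, List.filter_reverse, List.head?_reverse]
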